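-- pv_equiv track=rewrite | github.com/TellezM/F1_strategy | app/engine/simulation.py | enumerate_strategies
-- ===== SOURCE A (Python) =====
-- import itertools
-- from typing import List, Tuple
--
-- MIN_STINT_LAPS = 5
--
-- def enumerate_strategies(total_laps:int, available_tyres:List[str], max_stops=3):
--     """
--     Genera estrategias válidas (hasta max_stops), retorna listas de pitstops (lap,tyre).
--     Para ahorrar combinaciones: solo permite paradas entre lap 5 y lap total-5.
--     """
--     valid_laps = list(range(5, total_laps-4))
--     strategies = []
--     for stops in range(0, max_stops+1):
--         if stops == 0:
--             strategies.append([])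
--             continue
--         # elegir paradas (combinaciones de vueltas)
--         for laps in itertools.combinations(valid_laps, stops):
--             # asignar compuestos (cartesian product)
--             for tyres in itertools.product(available_tyres, repeat=stops):
--                 strategy = list(zip(laps, tyres))
--                 # validar stints min length
--                 laps_sorted = [0] + list(laps) + [total_laps]
--                 lengths = [laps_sorted[i+1]-laps_sorted[i] for i in range(len(laps_sorted)-1)]
--                 if all(l >= MIN_STINT_LAPS for l in lengths):
--                     strategies.append(strategy)
--     return strategies
-- ===== SOURCE B (Python) =====
-- MIN_STINT_LAPS = 5
--
-- def enumerate_strategies(total_laps, available_tyres, max_stops=3):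
--     """Build only valid pit-lap sequences by recursive generation (each next lap
--     starts MIN_STINT_LAPS after the previous), then attach tyre choices; never
--     enumerates tyre assignments for invalid lap sets."""
--     hi = total_laps - 5  # latest lap that leaves a final stint of >= 5 laps
--
--     def lap_combos(start, stops):
--         if stops == 0:
--             return [[]]
--         out = []
--         for lap in range(start, hi + 1):
--             for rest in lap_combos(lap + 5, stops - 1):
--                 out.append([lap] + rest)
--         return out
--
--     def attach_tyres(laps):
--         seqs = [[]]
--         for lap in reversed(laps):
--             seqs = [[(lap, t)] + tail for t in available_tyres for tail in seqs]
--         return seqs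
--
--     strategies = []
--     for stops in range(0, max_stops + 1):
--         if stops == 0:
--             strategies.append([])
--         else:
--             for laps in lap_combos(5, stops):
--                 strategies.extend(attach_tyres(laps))
--     return strategies
-- ===== Notes on version B (the rewrite author's own statement) =====
-- stated objective: alternative
-- what changed: Instead of enumerating all C(L,s) lap combinations and re-validating stint lengths inside every tyre-product iteration, B recursively generates only valid pit-lap sequences (each next lap at least MIN_STINT_LAPS after the previous, capped at total_laps-5) and attaches tyre assignments by a back-to-front product fold, so invalid lap sets never reach tyre enumeration.
import Mathlib
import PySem

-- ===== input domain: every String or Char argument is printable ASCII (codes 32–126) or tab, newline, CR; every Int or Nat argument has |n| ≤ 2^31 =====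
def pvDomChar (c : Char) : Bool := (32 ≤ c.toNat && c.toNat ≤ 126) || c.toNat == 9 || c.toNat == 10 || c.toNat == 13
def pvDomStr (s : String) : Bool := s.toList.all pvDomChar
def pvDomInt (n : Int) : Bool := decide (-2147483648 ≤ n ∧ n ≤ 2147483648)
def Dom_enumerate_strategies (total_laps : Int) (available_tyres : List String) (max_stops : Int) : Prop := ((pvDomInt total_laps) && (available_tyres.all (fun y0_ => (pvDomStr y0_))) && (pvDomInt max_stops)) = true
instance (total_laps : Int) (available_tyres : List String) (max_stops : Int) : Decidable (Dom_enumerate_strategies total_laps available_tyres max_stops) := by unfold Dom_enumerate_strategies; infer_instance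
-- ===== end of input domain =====

-- B replaces "enumerate every lap combination and re-validate stint lengths inside every
-- tyre-product iteration" by a recursive generator that emits only valid pit-lap sequences
-- and then attaches tyre products, so invalid lap sets never reach tyre enumeration.

-- ===== PORT A =====
-- itertools.combinations(l, k) in Python's order
def combosA : List Int → Nat → List (List Int)
  | _, 0 => [[]]
  | [], _ + 1 => []
  | x :: xs, k + 1 => ((combosA xs k).map (fun c => x :: c)) ++ combosA xs (k + 1)

-- itertools.product(ts, repeat=k) in Python's order
def prodA (ts : List String) : Nat → List (List String)
  | 0 => [[]]
  | k + 1 => ts.flatMap (fun t => (prodA ts k).map (fun c => t :: c))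

def enumerate_strategies (total_laps : Int) (available_tyres : List String) (max_stops : Int) : List (List (Int × String)) :=
  let valid_laps := PySem.List.pyRange 5 (total_laps - 4) 1
  (PySem.List.pyRange 0 (max_stops + 1) 1).foldl (fun strategies stops =>
    if stops == 0 then strategies ++ [[]]
    else
      (combosA valid_laps stops.toNat).foldl (fun strategies laps =>
        (prodA available_tyres stops.toNat).foldl (fun strategies tyres =>
          let strategy := laps.zip tyres
          let laps_sorted := 0 :: laps ++ [total_laps]
          -- laps_sorted[i+1]-laps_sorted[i] for i in range(len-1): indices always in range, getD is exact here
          let lengths := (List.range (laps_sorted.length - 1)).map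
            (fun i => laps_sorted.getD (i + 1) 0 - laps_sorted.getD i 0)
          if lengths.all (fun l => decide (5 ≤ l)) then strategies ++ [strategy] else strategies)
          strategies)
        strategies) []

-- ===== PORT B =====
-- lap_combos(start, stops) of Source B (the captured hi passed explicitly)
def lapCombos (hi : Int) : Nat → Int → List (List Int)
  | 0, _ => [[]]
  | s + 1, start =>
      (PySem.List.pyRange start (hi + 1) 1).foldl
        (fun out lap => out ++ (lapCombos hi s (lap + 5)).map (fun rest => lap :: rest)) []

-- attach_tyres(laps) of Source B
def attachTyres (tyres : List String) (laps : List Int) : List (List (Int × String)) :=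
  laps.reverse.foldl
    (fun seqs lap => tyres.flatMap (fun t => seqs.map (fun tail => (lap, t) :: tail))) [[]]

def enumerate_strategies_alt (total_laps : Int) (available_tyres : List String) (max_stops : Int) : List (List (Int × String)) :=
  let hi := total_laps - 5
  (PySem.List.pyRange 0 (max_stops + 1) 1).foldl (fun strategies stops =>
    if stops == 0 then strategies ++ [[]]
    else
      (lapCombos hi stops.toNat 5).foldl
        (fun strategies laps => strategies ++ attachTyres available_tyres laps) strategies) []

-- ===== PRECONDITION & SPEC =====
def Spec_enumerate_strategies (total_laps : Int) (available_tyres : List String) (max_stops : Int) (out : List (List (Int × String))) : Prop := out = enumerate_strategies_alt total_laps available_tyres max_stops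
instance (total_laps : Int) (available_tyres : List String) (max_stops : Int) (out : List (List (Int × String))) : Decidable (Spec_enumerate_strategies total_laps available_tyres max_stops out) := by unfold Spec_enumerate_strategies; infer_instance

-- ===== CLAIM (what is proved, stated in full; the proofs are below) =====
def Claim_equal_enumerate_strategies : Prop := ∀ (total_laps : Int) (available_tyres : List String) (max_stops : Int), Dom_enumerate_strategies total_laps available_tyres max_stops → Spec_enumerate_strategies total_laps available_tyres max_stops (enumerate_strategies total_laps available_tyres max_stops)

-- ===== LEMMAS AND PROOFS =====

-- consecutive differences of a list
def diffPairs : List Int → List Int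
  | a :: b :: r => (b - a) :: diffPairs (b :: r)
  | _ => []

-- A's stint condition read as a chain: boundary p consumed, laps c remaining, final boundary T
def chainB (T : Int) : Int → List Int → Bool
  | p, [] => decide (5 ≤ T - p)
  | p, x :: r => decide (5 ≤ x - p) && chainB T x r

-- B's generation invariant: every lap ≥ current lower bound m, the bound jumps by 5 per lap
def chainC : Int → List Int → Bool
  | _, [] => true
  | m, x :: r => decide (m ≤ x) && chainC (x + 5) r

lemma combosA_zero (l : List Int) : combosA l 0 = [[]] := by cases l <;> rfl

lemma length_of_mem_combosA : ∀ (l : List Int) (k : Nat) (c : List Int), c ∈ combosA l k → c.length = k := by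
  intro l
  induction l with
  | nil => intro k c h; cases k <;> simp [combosA] at h ; simp [h]
  | cons x xs ih =>
    intro k c h
    cases k with
    | zero => simp [combosA] at h; simp [h]
    | succ k =>
      simp only [combosA, List.mem_append, List.mem_map] at h
      rcases h with ⟨c', hc', rfl⟩ | h
      · simp [ih _ _ hc']
      · exact ih _ _ h

lemma mem_of_mem_combosA : ∀ (l : List Int) (k : Nat) (c : List Int), c ∈ combosA l k → ∀ x ∈ c, x ∈ l := by
  intro l
  induction l with
  | nil => intro k c h; cases k <;> simp [combosA] at h; simp [h]
  | cons y xs ih =>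
    intro k c h x hx
    cases k with
    | zero =>
      simp only [combosA_zero, List.mem_singleton] at h
      subst h; simp at hx
    | succ k =>
      simp only [combosA, List.mem_append, List.mem_map] at h
      rcases h with ⟨c', hc', rfl⟩ | h
      · rcases List.mem_cons.mp hx with rfl | hx'
        · exact List.mem_cons_self
        · exact List.mem_cons_of_mem _ (ih _ _ hc' _ hx')
      · exact List.mem_cons_of_mem _ (ih _ _ h _ hx)

-- the range/getD computation of A's `lengths` is the list of consecutive differences
lemma lengths_eq_diffPairs : ∀ (l : List Int) (a : Int),
    (List.range ((a :: l).length - 1)).map (fun i => (a :: l).getD (i + 1) 0 - (a :: l).getD i 0)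
      = diffPairs (a :: l) := by
  intro l
  induction l with
  | nil => intro a; simp [diffPairs]
  | cons b r ih =>
    intro a
    have hlen : (a :: b :: r).length - 1 = r.length + 1 := by simp
    rw [hlen, List.range_succ_eq_map]
    rw [List.map_cons, List.map_map, diffPairs]
    refine List.cons_eq_cons.mpr ⟨by simp [List.getD], ?_⟩
    rw [← ih b]
    have hlen2 : (b :: r).length - 1 = r.length := by simp
    rw [hlen2]
    refine List.map_congr_left ?_
    intro i _
    simp [List.getD]

lemma all_diffPairs_eq_chainB (T : Int) : ∀ (c : List Int) (p : Int),
    (diffPairs (p :: (c ++ [T]))).all (fun l => decide (5 ≤ l)) = chainB T p c := by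
  intro c
  induction c with
  | nil => intro p; simp [diffPairs, chainB]
  | cons x r ih => intro p; simp [diffPairs, chainB, List.all_cons, ih x]

lemma chainB_eq_chainC (T : Int) : ∀ (c : List Int) (p : Int), c ≠ [] → (∀ x ∈ c, x ≤ T - 5) →
    chainB T p c = chainC (p + 5) c := by
  intro c
  induction c with
  | nil => intro p h; exact absurd rfl h
  | cons x r ih =>
    intro p _ hb
    have hx : x ≤ T - 5 := hb x (by simp)
    cases r with
    | nil =>
      have h2 : (5:Int) ≤ T - x := by omega
      simp [chainB, chainC, h2, decide_eq_decide]
      omega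
    | cons y s =>
      have ht := ih x (by simp) (fun z hz => hb z (List.mem_cons_of_mem _ hz))
      show (decide (5 ≤ x - p) && chainB T x (y :: s)) = (decide (p + 5 ≤ x) && chainC (x + 5) (y :: s))
      rw [ht]
      congr 1
      simp [decide_eq_decide]; omega

lemma flatMap_if {α β : Type} (l : List α) (p : α → Bool) (h : α → List β) :
    l.flatMap (fun x => if p x then h x else []) = (l.filter p).flatMap h := by
  induction l with
  | nil => rfl
  | cons x xs ih =>
    by_cases hp : p x <;> simp [List.flatMap_cons, hp, ih]

lemma chainC_congr_head (m m' : Int) (c : List Int) (h : ∀ x ∈ c.head?, m ≤ x ∧ m' ≤ x) :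
    chainC m c = chainC m' c := by
  cases c with
  | nil => rfl
  | cons x r =>
    have := h x (by simp)
    simp [chainC, this.1, this.2]

-- raising the low end of the range below the chainC bound does not change the filtered combinations
lemma dropLow (hi m : Int) : ∀ (n : Nat) (s : Nat) (a : Int), a ≤ m → (m - a).toNat ≤ n →
    (combosA (PySem.List.pyRange a (hi + 1) 1) s).filter (chainC m)
      = (combosA (PySem.List.pyRange m (hi + 1) 1) s).filter (chainC m) := by
  intro n
  induction n with
  | zero =>
    intro s a ha hn
    have : a = m := by omega
    subst this; rfl
  | succ n ih =>
    intro s a ha hn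
    rcases eq_or_lt_of_le ha with rfl | hlt
    · rfl
    by_cases hhi : a ≤ hi
    · rw [PySem.List.pyRange_one_cons (by omega)]
      cases s with
      | zero => simp [combosA_zero]
      | succ s =>
        show ((((combosA (PySem.List.pyRange (a+1) (hi+1) 1) s).map (fun c => a :: c))
            ++ combosA (PySem.List.pyRange (a+1) (hi+1) 1) (s+1)).filter (chainC m)) = _
        rw [List.filter_append, List.filter_map]
        have hdead : ∀ c, (chainC m ∘ (fun c => a :: c)) c = false := by
          intro c
          simp [chainC, Function.comp]
          omega
        rw [List.filter_congr (fun c _ => hdead c), List.filter_false, List.map_nil, List.nil_append]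
        exact ih (s+1) (a+1) (by omega) (by omega)
    · rw [PySem.List.pyRange_one_eq_nil (by omega), PySem.List.pyRange_one_eq_nil (by omega)]

lemma lapCombos_flatMap (hi : Int) (s : Nat) (start : Int) :
    lapCombos hi (s + 1) start
      = (PySem.List.pyRange start (hi + 1) 1).flatMap
          (fun lap => (lapCombos hi s (lap + 5)).map (fun rest => lap :: rest)) := by
  show (PySem.List.pyRange start (hi + 1) 1).foldl _ [] = _
  rw [PySem.List.foldl_append_eq_flatMap]
  rfl

-- key: B's generator is exactly the chainC-filtered list of A's combinations
lemma lapCombos_eq_filter (hi : Int) : ∀ (s : Nat) (start : Int),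
    lapCombos hi s start = (combosA (PySem.List.pyRange start (hi + 1) 1) s).filter (chainC start) := by
  intro s
  induction s with
  | zero => intro start; simp [lapCombos, combosA_zero, chainC]
  | succ s ih =>
    suffices h : ∀ (n : Nat) (start : Int), (hi + 1 - start).toNat ≤ n →
        lapCombos hi (s + 1) start
          = (combosA (PySem.List.pyRange start (hi + 1) 1) (s + 1)).filter (chainC start) by
      intro start; exact h _ start le_rfl
    intro n
    induction n with
    | zero =>
      intro start hb
      rw [lapCombos_flatMap, PySem.List.pyRange_one_eq_nil (by omega)]
      rfl
    | succ n ihn =>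
      intro start hb
      by_cases hhi : start ≤ hi
      · rw [lapCombos_flatMap, PySem.List.pyRange_one_cons (by omega), List.flatMap_cons]
        rw [← lapCombos_flatMap]
        show (lapCombos hi s (start + 5)).map (fun rest => start :: rest) ++ lapCombos hi (s+1) (start+1) = _
        rw [show combosA (start :: PySem.List.pyRange (start+1) (hi+1) 1) (s+1)
              = ((combosA (PySem.List.pyRange (start+1) (hi+1) 1) s).map (fun c => start :: c))
                ++ combosA (PySem.List.pyRange (start+1) (hi+1) 1) (s+1) from rfl]
        rw [List.filter_append, List.filter_map]
        congr 1
        · have hcc : ∀ c ∈ combosA (PySem.List.pyRange (start+1) (hi+1) 1) s,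
              (chainC start ∘ (fun c => start :: c)) c = chainC (start + 5) c := by
            intro c _
            simp [chainC, Function.comp]
          rw [List.filter_congr hcc]
          rw [dropLow hi (start + 5) 4 s (start + 1) (by omega) (by omega)]
          rw [← ih (start + 5)]
        · have hcg : ∀ c ∈ combosA (PySem.List.pyRange (start+1) (hi+1) 1) (s+1),
              chainC start c = chainC (start + 1) c := by
            intro c hc
            refine chainC_congr_head _ _ _ ?_
            intro x hx
            have hxc : x ∈ c := List.mem_of_mem_head? hx
            have := PySem.List.mem_pyRange_one.mp (mem_of_mem_combosA _ _ _ hc x hxc)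
            omega
          rw [List.filter_congr hcg, ihn (start + 1) (by omega)]
      · rw [lapCombos_flatMap, PySem.List.pyRange_one_eq_nil (by omega)]
        rfl

lemma attachTyres_eq (tyres : List String) : ∀ (laps : List Int),
    attachTyres tyres laps = (prodA tyres laps.length).map (fun ts => laps.zip ts) := by
  intro laps
  induction laps with
  | nil => rfl
  | cons x ls ih =>
    rw [attachTyres, List.reverse_cons, List.foldl_append]
    have : (ls.reverse.foldl
        (fun seqs lap => tyres.flatMap (fun t => seqs.map (fun tail => (lap, t) :: tail))) [[]])
        = attachTyres tyres ls := rfl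
    rw [this, ih]
    show tyres.flatMap (fun t => ((prodA tyres ls.length).map (fun ts => ls.zip ts)).map
        (fun tail => (x, t) :: tail)) = _
    rw [show prodA tyres (x :: ls).length
        = tyres.flatMap (fun t => (prodA tyres ls.length).map (fun c => t :: c)) from rfl]
    rw [List.map_flatMap]
    refine List.flatMap_congr ?_
    intro t _
    simp [List.map_map, List.zip_cons_cons]

-- the per-stops step of A equals the per-stops step of B (stops ≥ 1 branch)
lemma step_eq (T : Int) (tyres : List String) (s : Nat) (hs : 1 ≤ s)
    (acc : List (List (Int × String))) :
    (combosA (PySem.List.pyRange 5 (T - 4) 1) s).foldl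
      (fun strategies laps =>
        (prodA tyres s).foldl (fun strategies tyresv =>
          if ((List.range ((0 :: laps ++ [T]).length - 1)).map
                (fun i => (0 :: laps ++ [T]).getD (i + 1) 0 - (0 :: laps ++ [T]).getD i 0)).all
                (fun l => decide (5 ≤ l))
          then strategies ++ [laps.zip tyresv] else strategies) strategies) acc
    = (lapCombos (T - 5) s 5).foldl (fun strategies laps => strategies ++ attachTyres tyres laps) acc := by
  -- rewrite A's inner fold into "append a block per valid lap combination"
  have hstep : ∀ laps ∈ combosA (PySem.List.pyRange 5 (T - 4) 1) s, ∀ acc',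
      (prodA tyres s).foldl (fun strategies tyresv =>
          if ((List.range ((0 :: laps ++ [T]).length - 1)).map
                (fun i => (0 :: laps ++ [T]).getD (i + 1) 0 - (0 :: laps ++ [T]).getD i 0)).all
                (fun l => decide (5 ≤ l))
          then strategies ++ [laps.zip tyresv] else strategies) acc'
        = acc' ++ (if chainC 5 laps then (prodA tyres s).map (fun ts => laps.zip ts) else []) := by
    intro laps hmem acc'
    have hne : laps ≠ [] := by
      intro h
      have := length_of_mem_combosA _ _ _ hmem
      rw [h] at this; simp at this; omega
    have hbd : ∀ x ∈ laps, x ≤ T - 5 := by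
      intro x hx
      have := PySem.List.mem_pyRange_one.mp (mem_of_mem_combosA _ _ _ hmem x hx)
      omega
    have hcond : ((List.range ((0 :: laps ++ [T]).length - 1)).map
          (fun i => (0 :: laps ++ [T]).getD (i + 1) 0 - (0 :: laps ++ [T]).getD i 0)).all
          (fun l => decide (5 ≤ l)) = chainC 5 laps := by
      rw [show ((0 :: laps ++ [T]) : List Int) = 0 :: (laps ++ [T]) from List.cons_append]
      rw [lengths_eq_diffPairs (laps ++ [T]) 0, all_diffPairs_eq_chainB T laps 0,
        chainB_eq_chainC T laps 0 hne hbd, show (0:Int) + 5 = 5 from by norm_num]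
    rw [hcond]
    by_cases hc : chainC 5 laps
    · simp only [hc, if_true]
      exact PySem.List.foldl_append_singleton_eq_map _ _ _
    · simp only [Bool.not_eq_true] at hc
      simp [hc]
  refine Eq.trans (PySem.List.foldl_congr_mem' _ _ _ acc hstep) ?_
  rw [PySem.List.foldl_append_eq_flatMap, flatMap_if,
    PySem.List.foldl_append_eq_flatMap]
  have hrange : T - 4 = (T - 5) + 1 := by ring
  rw [hrange, ← lapCombos_eq_filter (T - 5) s 5]
  congr 1
  refine List.flatMap_congr ?_
  intro laps hmem
  rw [attachTyres_eq]
  have hlen : laps.length = s := by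
    rw [lapCombos_eq_filter] at hmem
    exact length_of_mem_combosA _ _ _ (List.mem_of_mem_filter hmem)
  rw [hlen]

-- ===== VERDICT (by name: the statement is the Claim_ definition above) =====
theorem enumerate_strategies_spec : Claim_equal_enumerate_strategies := by
  intro total_laps available_tyres max_stops _
  unfold Spec_enumerate_strategies
  simp only [enumerate_strategies, enumerate_strategies_alt]
  refine PySem.List.foldl_congr_mem' _ _ _ _ ?_
  intro stops hmem acc
  have h0 : 0 ≤ stops := (PySem.List.mem_pyRange_one.mp hmem).1
  by_cases hz : stops = 0
  · simp [hz]
  · have hs : 1 ≤ stops.toNat := by omega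
    simp only [beq_iff_eq, hz, if_false]
    exact step_eq total_laps available_tyres stops.toNat hs acc
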